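-- pv_equiv track=rewrite | github.com/vaughngooding/account-scrubber | worker.py | parse_batch_results
-- ===== SOURCE A (Python) =====
-- def parse_batch_results(batch_response, batch_accounts):
--     """Parse batch response and match to accounts"""
--     if not batch_response:
--         return ["PERPLEXITY ERROR"] * len(batch_accounts)
--
--     results = []
--     lines = batch_response.split('\n')
--
--     for i in range(len(batch_accounts)):
--         found_result = False
--         for line in lines:
--             line = line.strip()
--             if line.startswith(f"{i+1}."):
--                 result = line[len(f"{i+1}."):].strip()
--                 results.append(result)
--                 found_result = True
--                 break
--
--         if not found_result:
--             results.append("PARSING ERROR - MANUAL REVIEW NEEDED")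
--
--     return results
-- ===== SOURCE B (Python) =====
-- def parse_batch_results(batch_response, batch_accounts):
--     """Parse batch response and match to accounts"""
--     if not batch_response:
--         return ["PERPLEXITY ERROR"] * len(batch_accounts)
--
--     first = {}
--     for line in batch_response.split('\n'):
--         line = line.strip()
--         prefix, sep, rest = line.partition('.')
--         if sep and prefix not in first:
--             first[prefix] = rest.strip()
--
--     return [first.get(str(i + 1), "PARSING ERROR - MANUAL REVIEW NEEDED")
--             for i in range(len(batch_accounts))]
-- ===== Notes on version B (the rewrite author's own statement) =====
-- stated objective: alternative
-- what changed: A rescans every response line once per account (nested loops, startswith per account); B makes a single pass over the lines, partitioning each stripped line at its first '.' into a dict keyed by the prefix (first occurrence wins), then answers each account by one dict lookup of str(i+1).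
import Mathlib
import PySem

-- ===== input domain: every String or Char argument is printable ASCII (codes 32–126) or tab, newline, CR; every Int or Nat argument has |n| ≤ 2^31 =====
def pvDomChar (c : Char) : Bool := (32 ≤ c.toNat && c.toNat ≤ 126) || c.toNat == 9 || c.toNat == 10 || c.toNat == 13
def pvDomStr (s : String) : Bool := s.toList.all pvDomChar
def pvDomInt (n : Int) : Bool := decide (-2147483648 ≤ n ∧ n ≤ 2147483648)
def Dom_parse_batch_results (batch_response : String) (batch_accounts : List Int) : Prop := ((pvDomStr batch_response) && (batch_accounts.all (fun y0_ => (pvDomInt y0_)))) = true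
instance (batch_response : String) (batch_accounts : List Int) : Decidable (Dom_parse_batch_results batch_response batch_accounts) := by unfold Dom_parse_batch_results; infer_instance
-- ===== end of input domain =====

-- B replaces A's per-account rescan of all lines (nested loops) by a single pass that indexes
-- each line's prefix-before-first-'.' in a dict (first occurrence wins) and then answers each
-- account by one lookup of str(i+1); the return values are proved equal on the whole domain.

-- ===== PORT A =====
-- inner loop of A for one account: first line whose strip() startswith pref, its remainder stripped
def pvA_find (pref : List Char) : List (List Char) → Option (List Char)
  | [] => none
  | l :: ls =>
    let t := PySem.Chars.strip l
    if PySem.Chars.startswith t pref then some (PySem.Chars.strip (t.drop pref.length))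
    else pvA_find pref ls

def parse_batch_results (batch_response : String) (batch_accounts : List Int) : List String :=
  if batch_response.toList = [] then
    List.replicate batch_accounts.length "PERPLEXITY ERROR"
  else
    let lines := PySem.Chars.splitOn batch_response.toList ['\n']
    (PySem.List.pyRange 0 (PySem.List.len batch_accounts) 1).foldl
      (fun results i =>
        match pvA_find (PySem.Int.toChars (i + 1) ++ ['.']) lines with
        | some r => results ++ [String.ofList r]
        | none => results ++ ["PARSING ERROR - MANUAL REVIEW NEEDED"]) []

-- ===== PORT B =====
-- hand port of t.partition('.') for the one-char separator: some (before, after) iff '.' occurs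
-- (exact: Python returns sep = '' exactly when '.' is absent, which B skips)
def pvPartitionDot : List Char → Option (List Char × List Char)
  | [] => none
  | c :: cs =>
    if c = '.' then some ([], cs)
    else match pvPartitionDot cs with
      | some (p, r) => some (c :: p, r)
      | none => none

-- body of B's single pass over the lines
def pvB_step (d : PySem.Dict (List Char) (List Char)) (l : List Char) :
    PySem.Dict (List Char) (List Char) :=
  let t := PySem.Chars.strip l
  match pvPartitionDot t with
  | some (pre, rest) =>
    if d.contains pre then d else d.insert pre (PySem.Chars.strip rest)
  | none => d

def parse_batch_results_alt (batch_response : String) (batch_accounts : List Int) : List String :=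
  if batch_response.toList = [] then
    List.replicate batch_accounts.length "PERPLEXITY ERROR"
  else
    let first := (PySem.Chars.splitOn batch_response.toList ['\n']).foldl pvB_step PySem.Dict.empty
    (PySem.List.pyRange 0 (PySem.List.len batch_accounts) 1).map
      (fun i => String.ofList (first.getD (PySem.Int.toChars (i + 1))
        "PARSING ERROR - MANUAL REVIEW NEEDED".toList))

-- ===== PRECONDITION & SPEC =====
def Spec_parse_batch_results (batch_response : String) (batch_accounts : List Int) (out : List String) : Prop := out = parse_batch_results_alt batch_response batch_accounts
instance (batch_response : String) (batch_accounts : List Int) (out : List String) : Decidable (Spec_parse_batch_results batch_response batch_accounts out) := by unfold Spec_parse_batch_results; infer_instance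

-- ===== CLAIM (what is proved, stated in full; the proofs are below) =====
def Claim_equal_parse_batch_results : Prop := ∀ (batch_response : String) (batch_accounts : List Int), Dom_parse_batch_results batch_response batch_accounts → Spec_parse_batch_results batch_response batch_accounts (parse_batch_results batch_response batch_accounts)

-- ===== LEMMAS AND PROOFS =====

theorem pv_digitChar_ne_dot (m : Nat) : Nat.digitChar m ≠ '.' := by
  rcases m with _|_|_|_|_|_|_|_|_|_|_|_|_|_|_|_|n <;> simp [Nat.digitChar]

theorem pv_toDigitsCore_no_dot (fuel : Nat) : ∀ (n : Nat) (ds : List Char),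
    '.' ∉ ds → '.' ∉ Nat.toDigitsCore 10 fuel n ds := by
  induction fuel with
  | zero => intro n ds h; simpa [Nat.toDigitsCore] using h
  | succ f ih =>
    intro n ds h
    simp only [Nat.toDigitsCore]
    split
    · intro hm
      rcases List.mem_cons.mp hm with h1 | h2
      · exact pv_digitChar_ne_dot (n % 10) h1.symm
      · exact h h2
    · refine ih _ _ ?_
      intro hm
      rcases List.mem_cons.mp hm with h1 | h2
      · exact pv_digitChar_ne_dot (n % 10) h1.symm
      · exact h h2

theorem pv_toChars_no_dot (n : Int) : '.' ∉ PySem.Int.toChars n := by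
  unfold PySem.Int.toChars
  split
  · intro hm
    rcases List.mem_cons.mp hm with h1 | h2
    · exact absurd h1 (by decide)
    · exact pv_toDigitsCore_no_dot _ _ _ (by simp) h2
  · exact pv_toDigitsCore_no_dot _ _ _ (by simp)

theorem pvPartitionDot_none_iff (t : List Char) : pvPartitionDot t = none ↔ '.' ∉ t := by
  induction t with
  | nil => simp [pvPartitionDot]
  | cons c cs ih =>
    simp only [pvPartitionDot]
    by_cases hc : c = '.'
    · subst hc; simp
    · cases h : pvPartitionDot cs with
      | none => simp_all [Ne.symm hc]
      | some p => simp_all [Ne.symm hc, List.mem_cons]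

theorem pvPartitionDot_some (t : List Char) : ∀ p r, pvPartitionDot t = some (p, r) →
    t = p ++ '.' :: r ∧ '.' ∉ p := by
  induction t with
  | nil => intro p r h; simp [pvPartitionDot] at h
  | cons c cs ih =>
    intro p r h
    simp only [pvPartitionDot] at h
    by_cases hc : c = '.'
    · subst hc
      simp at h
      obtain ⟨hp, hr⟩ := h
      subst hp; subst hr; simp
    · simp [hc] at h
      cases hps : pvPartitionDot cs with
      | none => rw [hps] at h; simp at h
      | some pr =>
        rw [hps] at h
        obtain ⟨p', r'⟩ := pr
        simp at h
        obtain ⟨hp, hr⟩ := h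
        obtain ⟨ht, hnd⟩ := ih p' r' hps
        subst hp; subst hr; subst ht
        simp [List.mem_cons, Ne.symm hc, hnd]

theorem pv_split_uniq (p₁ : List Char) : ∀ (p₂ r₁ r₂ : List Char), '.' ∉ p₁ → '.' ∉ p₂ →
    p₁ ++ '.' :: r₁ = p₂ ++ '.' :: r₂ → p₁ = p₂ ∧ r₁ = r₂ := by
  induction p₁ with
  | nil =>
    intro p₂ r₁ r₂ _ h2 heq
    cases p₂ with
    | nil => simpa using heq
    | cons d ds =>
      simp at heq
      exact absurd (heq.1 ▸ List.mem_cons_self) h2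
  | cons c cs ih =>
    intro p₂ r₁ r₂ h1 h2 heq
    cases p₂ with
    | nil =>
      simp at heq
      exact absurd (heq.1 ▸ List.mem_cons_self) h1
    | cons d ds =>
      simp only [List.cons_append, List.cons.injEq] at heq
      obtain ⟨hcd, htl⟩ := heq
      have := ih ds r₁ r₂ (fun h => h1 (List.mem_cons_of_mem _ h))
        (fun h => h2 (List.mem_cons_of_mem _ h)) htl
      exact ⟨by rw [hcd, this.1], this.2⟩

-- per-line: A's startswith test for key agrees with B's partition at the first '.'
theorem pv_line_match (key t : List Char) (hnd : '.' ∉ key) :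
    (if PySem.Chars.startswith t (key ++ ['.'])
      then some (PySem.Chars.strip (t.drop (key ++ ['.']).length)) else none)
    = match pvPartitionDot t with
      | some (p, r) => if p = key then some (PySem.Chars.strip r) else none
      | none => none := by
  cases h : pvPartitionDot t with
  | none =>
    have hdot : '.' ∉ t := (pvPartitionDot_none_iff t).mp h
    have hsw : ¬ PySem.Chars.startswith t (key ++ ['.']) = true := by
      intro hs
      have hpre := (PySem.Chars.startswith_iff t (key ++ ['.'])).mp hs
      exact hdot (hpre.mem (by simp))
    simp [hsw]
  | some pr =>
    obtain ⟨p, r⟩ := pr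
    obtain ⟨ht, hp⟩ := pvPartitionDot_some t p r h
    by_cases hpk : p = key
    · subst hpk
      have hsw : PySem.Chars.startswith t (p ++ ['.']) = true := by
        rw [PySem.Chars.startswith_iff, ht]
        exact ⟨r, by simp⟩
      have hdrop : t.drop (p.length + 1) = r := by
        have hpr : p ++ '.' :: r = (p ++ ['.']) ++ r := by simp
        have hl : (p ++ ['.']).length = p.length + 1 := by simp
        rw [ht, hpr, ← hl, List.drop_left]
      simp [hsw, hdrop]
    · have hsw : ¬ PySem.Chars.startswith t (key ++ ['.']) = true := by
        intro hs
        obtain ⟨s, hsfx⟩ := (PySem.Chars.startswith_iff t (key ++ ['.'])).mp hs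
        have : key ++ '.' :: s = p ++ '.' :: r := by
          rw [← ht, ← hsfx]; simp
        exact hpk ((pv_split_uniq key p s r hnd hp this).1).symm
      simp [hsw, hpk]

-- B's dict after the scan looks up exactly what A's inner loop finds
theorem pv_scan_get? (key : List Char) (hnd : '.' ∉ key) (lines : List (List Char)) :
    ∀ d : PySem.Dict (List Char) (List Char),
    (lines.foldl pvB_step d).get? key = (d.get? key).or (pvA_find (key ++ ['.']) lines) := by
  induction lines with
  | nil => intro d; simp [pvA_find]
  | cons l ls ih =>
    intro d
    have hline := pv_line_match key (PySem.Chars.strip l) hnd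
    simp only [List.foldl_cons]
    have hA : pvA_find (key ++ ['.']) (l :: ls) =
        (if PySem.Chars.startswith (PySem.Chars.strip l) (key ++ ['.'])
         then some (PySem.Chars.strip ((PySem.Chars.strip l).drop (key ++ ['.']).length))
         else pvA_find (key ++ ['.']) ls) := rfl
    rw [hA]
    cases h : pvPartitionDot (PySem.Chars.strip l) with
    | none =>
      have hstep : pvB_step d l = d := by unfold pvB_step; simp only [h]
      have hsw : PySem.Chars.startswith (PySem.Chars.strip l) (key ++ ['.']) = false := by
        by_contra hc
        simp only [Bool.not_eq_false] at hc
        rw [h, hc] at hline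
        simp at hline
      rw [hstep, hsw]
      simp only [Bool.false_eq_true, if_false]
      exact ih d
    | some pr =>
      obtain ⟨pre, rest⟩ := pr
      rw [h] at hline
      by_cases hpk : pre = key
      · subst hpk
        have hstep : pvB_step d l =
            (if d.contains pre then d else d.insert pre (PySem.Chars.strip rest)) := by
          unfold pvB_step; simp only [h]
        have hsw : PySem.Chars.startswith (PySem.Chars.strip l) (pre ++ ['.']) = true := by
          by_contra hc
          simp [hc] at hline
        have hval : PySem.Chars.strip ((PySem.Chars.strip l).drop (pre ++ ['.']).length)
            = PySem.Chars.strip rest := by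
          rw [hsw] at hline
          simpa using hline
        rw [hstep, hsw]
        simp only [if_true]
        cases hd : d.get? pre with
        | some v =>
          have hcon : d.contains pre = true := by
            rw [PySem.Dict.contains_eq_isSome_get?, hd]; rfl
          rw [hcon]
          simp only [if_true, ih, hd, Option.some_or]
        | none =>
          have hcon : d.contains pre = false := by
            rw [PySem.Dict.contains_eq_isSome_get?, hd]; rfl
          rw [hcon]
          simp only [Bool.false_eq_true, if_false, ih, PySem.Dict.get?_insert_self,
            Option.some_or, Option.none_or, hval]
      · have hstep : pvB_step d l =
            (if d.contains pre then d else d.insert pre (PySem.Chars.strip rest)) := by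
          unfold pvB_step; simp only [h]
        have hsw : PySem.Chars.startswith (PySem.Chars.strip l) (key ++ ['.']) = false := by
          by_contra hc
          simp only [Bool.not_eq_false] at hc
          rw [hc] at hline
          simp [hpk] at hline
        rw [hstep, hsw]
        simp only [Bool.false_eq_true, if_false]
        split
        · exact ih d
        · rw [ih, PySem.Dict.get?_insert]
          simp [Ne.symm hpk]

-- ===== VERDICT (by name: the statement is the Claim_ definition above) =====
theorem parse_batch_results_spec : Claim_equal_parse_batch_results := by
  intro batch_response batch_accounts _
  unfold Spec_parse_batch_results parse_batch_results parse_batch_results_alt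
  by_cases hempty : batch_response.toList = []
  · simp [hempty]
  · simp only [hempty, if_false]
    have hfold : ∀ (lines : List (List Char)) (rng : List Int),
        rng.foldl (fun results i =>
          match pvA_find (PySem.Int.toChars (i + 1) ++ ['.']) lines with
          | some r => results ++ [String.ofList r]
          | none => results ++ ["PARSING ERROR - MANUAL REVIEW NEEDED"]) []
        = rng.map (fun i =>
            match pvA_find (PySem.Int.toChars (i + 1) ++ ['.']) lines with
            | some r => String.ofList r
            | none => "PARSING ERROR - MANUAL REVIEW NEEDED") := by
      intro lines rng
      have hbody : (fun (results : List String) (i : Int) =>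
          match pvA_find (PySem.Int.toChars (i + 1) ++ ['.']) lines with
          | some r => results ++ [String.ofList r]
          | none => results ++ ["PARSING ERROR - MANUAL REVIEW NEEDED"])
        = (fun results i => results ++ [match pvA_find (PySem.Int.toChars (i + 1) ++ ['.']) lines with
            | some r => String.ofList r
            | none => "PARSING ERROR - MANUAL REVIEW NEEDED"]) := by
        funext results i
        cases pvA_find (PySem.Int.toChars (i + 1) ++ ['.']) lines <;> rfl
      rw [hbody, PySem.List.foldl_append_singleton_eq_map]
      simp
    rw [hfold]
    apply List.map_congr_left
    intro i _
    have hget := pv_scan_get? (PySem.Int.toChars (i + 1)) (pv_toChars_no_dot (i + 1))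
      (PySem.Chars.splitOn batch_response.toList ['\n']) PySem.Dict.empty
    rw [PySem.Dict.getD_eq_get?_getD, hget]
    simp only [PySem.Dict.get?_empty, Option.none_or]
    cases pvA_find (PySem.Int.toChars (i + 1) ++ ['.'])
        (PySem.Chars.splitOn batch_response.toList ['\n']) with
    | some r => rfl
    | none => rfl
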